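-- pv_equiv track=rewrite | github.com/magnificentLee/Study | 알고리즘/그리디/1-50/47.불꽃놀이.py | fire_crack
-- ===== SOURCE A (Python) =====
-- def fire_crack(n, start, end):
--     fire_min = 0
--     for i in range(n - 2):
--         if i == n - 3:  # 중간에 하나만 남아서 둘 다 터뜨려야 하는 경우
--             start -= 1
--             end -= 1
--         elif start < end:
--             end -= 1
--         elif start == end:  # 높이가 시작 < 끝이기 때문
--             end -= 1
--         else:
--             start -= 1
--     fire_min = max(start, end)
--     return fire_min
-- ===== SOURCE B (Python) =====
-- def fire_crack(n, start, end):
--     if n < 3: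
--         return max(start, end)
--     k = n - 3
--     hi, lo = max(start, end), min(start, end)
--     d = hi - lo
--     if k <= d:
--         return hi - k - 1
--     return lo - (k - d) // 2 - 1
-- ===== Notes on version B (the rewrite author's own statement) =====
-- stated objective: faster
-- what changed: Replaced the O(n) simulation loop (repeatedly decrementing the larger of the two heights, then both at the last step) by a closed-form O(1) formula: k=n-3 balancing steps consume the gap first, then alternate, so the answer is hi-k-1 if k<=hi-lo else lo-(k-(hi-lo))//2-1.
import Mathlib
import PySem

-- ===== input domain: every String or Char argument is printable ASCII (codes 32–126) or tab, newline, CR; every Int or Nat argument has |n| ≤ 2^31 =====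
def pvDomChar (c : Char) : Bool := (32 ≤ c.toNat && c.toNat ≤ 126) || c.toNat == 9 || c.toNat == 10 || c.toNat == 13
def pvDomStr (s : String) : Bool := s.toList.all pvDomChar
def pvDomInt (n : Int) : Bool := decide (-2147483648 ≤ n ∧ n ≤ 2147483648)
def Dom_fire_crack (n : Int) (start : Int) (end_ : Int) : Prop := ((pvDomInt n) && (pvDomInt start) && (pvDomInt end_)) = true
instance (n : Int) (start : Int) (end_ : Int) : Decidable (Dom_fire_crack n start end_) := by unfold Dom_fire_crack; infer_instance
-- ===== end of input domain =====

-- B replaces A's O(n) step-by-step simulation with an O(1) closed-form formula (objective: faster, asymptotic).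

-- ===== PORT A =====
-- one loop iteration of A's for-loop (state = (start, end))
def fireStep (n : Int) (p : Int × Int) (i : Int) : Int × Int :=
  if i == n - 3 then (p.1 - 1, p.2 - 1)
  else if p.1 < p.2 then (p.1, p.2 - 1)
  else if p.1 == p.2 then (p.1, p.2 - 1)
  else (p.1 - 1, p.2)

def fire_crack (n : Int) (start : Int) (end_ : Int) : Int :=
  let p := (PySem.List.pyRange 0 (n - 2) 1).foldl (fireStep n) (start, end_)
  max p.1 p.2

-- ===== PORT B =====
def fire_crack_alt (n : Int) (start : Int) (end_ : Int) : Int :=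
  if n < 3 then max start end_
  else
    let k := n - 3
    let hi := max start end_
    let lo := min start end_
    let d := hi - lo
    if k ≤ d then hi - k - 1
    else lo - PySem.Int.floordiv (k - d) 2 - 1

-- ===== PRECONDITION & SPEC =====
def Spec_fire_crack (n : Int) (start : Int) (end_ : Int) (out : Int) : Prop := out = fire_crack_alt n start end_
instance (n : Int) (start : Int) (end_ : Int) (out : Int) : Decidable (Spec_fire_crack n start end_ out) := by unfold Spec_fire_crack; infer_instance

-- ===== CLAIM (what is proved, stated in full; the proofs are below) =====
def Claim_equal_fire_crack : Prop := ∀ (n : Int) (start : Int) (end_ : Int), Dom_fire_crack n start end_ → Spec_fire_crack n start end_ (fire_crack n start end_)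

-- ===== LEMMAS AND PROOFS =====

-- a balancing iteration (any i ≠ n-3): decrement a maximal coordinate
def balStep (p : Int × Int) : Int × Int :=
  if p.1 ≤ p.2 then (p.1, p.2 - 1) else (p.1 - 1, p.2)

theorem fireStep_of_ne (n i : Int) (p : Int × Int) (h : i ≠ n - 3) :
    fireStep n p i = balStep p := by
  unfold fireStep balStep
  simp only [beq_iff_eq, h, if_false]
  rcases p with ⟨a, b⟩
  by_cases hlt : a < b <;> by_cases heq : a = b <;> simp [hlt, heq] <;> omega

-- closed form for (max, min) after k balancing steps from a pair with max hi, min lo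
def mmAfter (hi lo : Int) (k : Nat) : Int × Int :=
  if (k : Int) ≤ hi - lo then (hi - k, lo)
  else (lo - (k - (hi - lo)) / 2, lo - (k - (hi - lo) + 1) / 2)

theorem maxmin_balStep (p : Int × Int) :
    (max (balStep p).1 (balStep p).2, min (balStep p).1 (balStep p).2)
      = (max (max p.1 p.2 - 1) (min p.1 p.2), min (max p.1 p.2 - 1) (min p.1 p.2)) := by
  rcases p with ⟨a, b⟩
  unfold balStep
  by_cases h : a ≤ b <;> simp [h, Prod.ext_iff] <;> constructor <;> omega

theorem maxmin_iterate (k : Nat) : ∀ (p : Int × Int),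
    (max (balStep^[k] p).1 (balStep^[k] p).2, min (balStep^[k] p).1 (balStep^[k] p).2)
      = mmAfter (max p.1 p.2) (min p.1 p.2) k := by
  induction k with
  | zero =>
      intro p
      simp [mmAfter]
  | succ k ih =>
      intro p
      rw [Function.iterate_succ_apply' ]
      have h1 := maxmin_balStep (balStep^[k] p)
      have h2 := ih p
      rw [h1]
      rw [Prod.ext_iff] at h2 ⊢
      obtain ⟨hM, hm⟩ := h2
      simp only at hM hm ⊢
      rw [hM, hm]
      have hlm : min p.1 p.2 ≤ max p.1 p.2 := min_le_max
      unfold mmAfter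
      set hi := max p.1 p.2
      set lo := min p.1 p.2
      by_cases hk : (k : Int) ≤ hi - lo <;>
        by_cases hk1 : ((k + 1 : Nat) : Int) ≤ hi - lo <;>
        push_cast at hk hk1 ⊢ <;>
        simp only [hk, hk1, if_pos, if_false] <;>
        constructor <;>
        all_goals (simp only [max_def, min_def]; split_ifs <;> omega)

-- the prefix of the range (all i < n - 3) folds to iterated balancing steps
theorem prefix_fold (n : Int) (k : Nat) (hk : (k : Int) ≤ n - 3) : ∀ (p : Int × Int),
    (PySem.List.pyRange 0 (k : Int) 1).foldl (fireStep n) p = balStep^[k] p := by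
  induction k with
  | zero => intro p; simp [PySem.List.pyRange_one_eq_nil (by omega : (0:Int) ≤ 0)]
  | succ k ih =>
      intro p
      have hcast : ((k + 1 : Nat) : Int) = (k : Int) + 1 := by push_cast; ring
      rw [hcast, PySem.List.pyRange_one_succ_right (by omega : (0 : Int) ≤ (k : Int)),
        List.foldl_append]
      rw [ih (by push_cast at hk; omega)]
      simp only [List.foldl_cons, List.foldl_nil]
      rw [fireStep_of_ne n (k : Int) _ (by push_cast at hk; omega),
        ← Function.iterate_succ_apply' balStep]

-- ===== VERDICT (by name: the statement is the Claim_ definition above) =====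
theorem fire_crack_spec : Claim_equal_fire_crack := by
  intro n start end_ _
  unfold Spec_fire_crack fire_crack fire_crack_alt
  by_cases h3 : n < 3
  · rw [PySem.List.pyRange_one_eq_nil (by omega : n - 2 ≤ 0)]
    simp [h3]
  · -- n ≥ 3: split off the final element n - 3 of the range
    set k : Nat := (n - 3).toNat with hkdef
    have hk : (k : Int) = n - 3 := by omega
    have hsplit : PySem.List.pyRange 0 (n - 2) 1
        = PySem.List.pyRange 0 (n - 3) 1 ++ [n - 3] := by
      have : n - 2 = (n - 3) + 1 := by ring
      rw [this, PySem.List.pyRange_one_succ_right (by omega : (0 : Int) ≤ n - 3)]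
    rw [hsplit, List.foldl_append, ← hk, prefix_fold n k (by omega)]
    simp only [List.foldl_cons, List.foldl_nil]
    have hstep : fireStep n (balStep^[k] (start, end_)) (k : Int)
        = ((balStep^[k] (start, end_)).1 - 1, (balStep^[k] (start, end_)).2 - 1) := by
      unfold fireStep; rw [hk]; simp
    rw [hstep]
    have hmm := maxmin_iterate k (start, end_)
    rw [Prod.ext_iff] at hmm
    obtain ⟨hM, _⟩ := hmm
    simp only at hM
    have hmax : max ((balStep^[k] (start, end_)).1 - 1) ((balStep^[k] (start, end_)).2 - 1)
        = max (balStep^[k] (start, end_)).1 (balStep^[k] (start, end_)).2 - 1 := by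
      rw [max_def, max_def]; split_ifs <;> omega
    set hi := max start end_
    set lo := min start end_
    have hM1 : max (balStep^[k] (start, end_)).1 (balStep^[k] (start, end_)).2
        = if (k : Int) ≤ hi - lo then hi - (k : Int) else lo - ((k : Int) - (hi - lo)) / 2 := by
      rw [hM]; unfold mmAfter; split_ifs <;> rfl
    have hfd : PySem.Int.floordiv ((k : Int) - (hi - lo)) 2 = ((k : Int) - (hi - lo)) / 2 :=
      PySem.Int.floordiv_eq_ediv_of_pos (by omega)
    rw [hmax, hM1]
    simp only [h3, if_false]
    split_ifs with hcase
    · omega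
    · rw [hfd]
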